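-- pv_equiv track=rewrite | github.com/kurusnsn/deterministic-ml-engine | gateway-service/gateway_modules/concepts/concept_grounding.py | _filter_by_color
-- ===== SOURCE A (Python) =====
-- from typing import List, Tuple, Dict, Optional, Set
--
-- def _filter_by_color(
--
--     statements: List[str],
--     statements_lower: List[str],
--     preferred_color: Optional[str],
-- ) -> List[str]:
--     """
--     Filter statements by color preference.
--
--     Args:
--         statements: Original case statements
--         statements_lower: Lowercase versions for matching
--         preferred_color: "white", "black", or None
--
--     Returns:
--         Filtered list of statements (original case)
--     """
--     if not preferred_color:
--         return statements
--
--     # Prefer statements mentioning the preferred color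
--     matching = []
--     other = []
--
--     for stmt, stmt_lower in zip(statements, statements_lower):
--         if preferred_color in stmt_lower:
--             matching.append(stmt)
--         else:
--             other.append(stmt)
--
--     # Return matching first, then other (up to limit)
--     return matching + other
-- ===== SOURCE B (Python) =====
-- def _filter_by_color(statements, statements_lower, preferred_color):
--     if not preferred_color:
--         return statements
--     order = sorted(zip(statements, statements_lower),
--                    key=lambda pair: preferred_color not in pair[1])
--     return [stmt for stmt, _ in order]
-- ===== Notes on version B (the rewrite author's own statement) =====
-- stated objective: alternative
-- what changed: Replaces the explicit matching/other accumulator loop by a single stable sort of zip(statements, statements_lower) on the boolean key 'preferred_color not in lower', relying on sort stability to keep matching statements first in original order.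
import Mathlib
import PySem

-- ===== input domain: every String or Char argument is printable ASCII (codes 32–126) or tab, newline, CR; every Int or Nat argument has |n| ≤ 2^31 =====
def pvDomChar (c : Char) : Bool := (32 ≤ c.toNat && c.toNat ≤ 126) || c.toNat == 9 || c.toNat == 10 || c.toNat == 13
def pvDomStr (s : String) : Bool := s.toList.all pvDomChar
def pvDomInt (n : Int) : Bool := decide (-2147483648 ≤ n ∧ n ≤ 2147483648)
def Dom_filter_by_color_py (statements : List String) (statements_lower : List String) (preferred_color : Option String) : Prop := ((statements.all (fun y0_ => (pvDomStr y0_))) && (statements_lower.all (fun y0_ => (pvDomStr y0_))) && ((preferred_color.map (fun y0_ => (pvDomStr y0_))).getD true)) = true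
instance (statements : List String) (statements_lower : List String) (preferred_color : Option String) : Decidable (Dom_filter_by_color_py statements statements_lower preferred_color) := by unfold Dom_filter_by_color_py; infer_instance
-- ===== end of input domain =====

-- B replaces A's two-accumulator partition loop by a stable sort of the zipped pairs on the
-- boolean key "preferred color not mentioned" (matches sort first, stability keeps order); an
-- alternative decomposition, not claimed faster.


-- ===== PORT A =====
-- 'if not preferred_color' is true for None and for the empty string.
def filter_by_color_py (statements : List String) (statements_lower : List String) (preferred_color : Option String) : List String :=
  match preferred_color with
  | none => statements
  | some c =>
    if c = "" then statements
    else
      let r := (statements.zip statements_lower).foldl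
        (fun (acc : List String × List String) p =>
          if PySem.Str.isIn c p.2 then (acc.1 ++ [p.1], acc.2) else (acc.1, acc.2 ++ [p.1]))
        ([], [])
      r.1 ++ r.2

-- ===== PORT B =====
-- stable sort of the zipped pairs on the boolean key 'preferred_color not in pair[1]', then take the statements
def filter_by_color_py_alt (statements : List String) (statements_lower : List String) (preferred_color : Option String) : List String :=
  match preferred_color with
  | none => statements
  | some c =>
    if c = "" then statements
    else
      (PySem.List.sorted (statements.zip statements_lower)
        (fun pair => !PySem.Str.isIn c pair.2)).map (fun p => p.1)

-- ===== PRECONDITION & SPEC =====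
def Spec_filter_by_color_py (statements : List String) (statements_lower : List String) (preferred_color : Option String) (out : List String) : Prop := out = filter_by_color_py_alt statements statements_lower preferred_color
instance (statements : List String) (statements_lower : List String) (preferred_color : Option String) (out : List String) : Decidable (Spec_filter_by_color_py statements statements_lower preferred_color out) := by unfold Spec_filter_by_color_py; infer_instance

-- ===== CLAIM (what is proved, stated in full; the proofs are below) =====
def Claim_equal_filter_by_color_py : Prop := ∀ (statements : List String) (statements_lower : List String) (preferred_color : Option String), Dom_filter_by_color_py statements statements_lower preferred_color → Spec_filter_by_color_py statements statements_lower preferred_color (filter_by_color_py statements statements_lower preferred_color)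

-- ===== LEMMAS AND PROOFS =====

-- inserting x before a block T whose head (if any) x must precede, past a prefix F it must not precede
theorem insertBy_mid {α : Type} (before : α → α → Bool) (x : α) (F T : List α)
    (hF : ∀ y ∈ F, before x y = false)
    (hT : ∀ h t, T = h :: t → before x h = true) :
    PySem.List.insertBy before x (F ++ T) = F ++ x :: T := by
  induction F with
  | nil =>
    cases T with
    | nil => simp [PySem.List.insertBy]
    | cons h t => simp [PySem.List.insertBy, hT h t rfl]
  | cons f F ih =>
    simp only [List.cons_append, PySem.List.insertBy, hF f (by simp), ite_false, Bool.false_eq_true,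
      if_neg]
    exact congrArg (f :: ·) (ih (fun y hy => hF y (by simp [hy])))

-- the insertion-sort loop with a Bool key keeps a (key=false block) ++ (key=true block) shape
theorem foldl_insertBy_bool {α : Type} (key : α → Bool) (l : List α) :
    ∀ (F T : List α), (∀ y ∈ F, key y = false) → (∀ y ∈ T, key y = true) →
    l.foldl (fun acc x => PySem.List.insertBy (fun a b => decide (key a < key b)) x acc) (F ++ T)
      = (F ++ l.filter (fun x => !key x)) ++ (T ++ l.filter key) := by
  induction l with
  | nil => intro F T _ _; simp
  | cons x l ih =>
    intro F T hF hT
    cases hx : key x with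
    | true =>
      have hins : PySem.List.insertBy (fun a b => decide (key a < key b)) x (F ++ T)
          = (F ++ T) ++ [x] :=
        PySem.List.insertBy_of_forall_not_before _ _ _
          (fun y _ => by simp [Bool.lt_iff, hx])
      have := ih F (T ++ [x]) hF (fun y hy => by
        rcases List.mem_append.mp hy with h | h
        · exact hT y h
        · simp at h; simpa [h] using hx)
      simp only [List.foldl_cons, hins, List.append_assoc] at this ⊢
      rw [this]
      simp [List.filter_cons, hx]
    | false =>
      have hins : PySem.List.insertBy (fun a b => decide (key a < key b)) x (F ++ T)
          = F ++ x :: T := by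
        apply insertBy_mid
        · intro y hy; simp [Bool.lt_iff, hF y hy]
        · intro h t ht; simp [Bool.lt_iff, hx, hT h (by simp [ht])]
      have := ih (F ++ [x]) T (fun y hy => by
        rcases List.mem_append.mp hy with h | h
        · exact hF y h
        · simp at h; simpa [h] using hx) hT
      simp only [List.foldl_cons, hins] at this ⊢
      rw [show F ++ x :: T = (F ++ [x]) ++ T by simp, this]
      simp [List.filter_cons, hx]

-- B's stable sort on a Bool key is exactly "key-false elements first, key-true after", in order
theorem sorted_bool {α : Type} (key : α → Bool) (l : List α) :
    PySem.List.sorted l key = l.filter (fun x => !key x) ++ l.filter key := by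
  rw [PySem.List.sorted_eq_foldl_insertBy]
  simpa using foldl_insertBy_bool key l [] [] (by simp) (by simp)

-- A's two-accumulator partition loop, characterised by filters
theorem partition_foldl (c : String) (l : List (String × String)) (m o : List String) :
    l.foldl (fun (acc : List String × List String) p =>
        if PySem.Str.isIn c p.2 then (acc.1 ++ [p.1], acc.2) else (acc.1, acc.2 ++ [p.1])) (m, o)
      = (m ++ (l.filter (fun p => PySem.Str.isIn c p.2)).map (fun p => p.1),
         o ++ (l.filter (fun p => !PySem.Str.isIn c p.2)).map (fun p => p.1)) := by
  induction l generalizing m o with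
  | nil => simp
  | cons p l ih =>
    simp only [PySem.Str.isIn_eq] at ih
    by_cases h : PySem.Chars.isIn c.toList p.2.toList = true <;>
      simp [List.filter_cons, h, ih]

-- ===== VERDICT (by name: the statement is the Claim_ definition above) =====
theorem filter_by_color_py_spec : Claim_equal_filter_by_color_py := by
  intro statements statements_lower preferred_color _
  unfold Spec_filter_by_color_py filter_by_color_py filter_by_color_py_alt
  cases preferred_color with
  | none => rfl
  | some c =>
    by_cases hc : c = ""
    · simp [hc]
    · simp only [hc, if_neg, ite_false]
      rw [partition_foldl, sorted_bool]
      simp
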